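-- pv_equiv track=rewrite | github.com/sydoky/Python | python class 7/NewDay3.py | anewlist
-- ===== SOURCE A (Python) =====
-- def anewlist(yoyo):
--     number = []
--     highest = None
--     for loop in yoyo:
--         if highest == None:
--             if loop % 2 == 1:
--                 highest = loop
--
--         elif loop % 2 == 1 and loop > highest:
--             highest = loop
--     lowest = None
--     for loop in yoyo:
--         if lowest == None:
--             if loop % 2 == 0:
--                 lowest = loop
--         elif loop % 2 == 0 and loop < lowest:
--             lowest = loop
--     number.append(highest)
--     number.append(lowest)
--     return number
-- ===== SOURCE B (Python) =====
-- def anewlist(yoyo):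
--     odds = [x for x in yoyo if x % 2 == 1]
--     evens = [x for x in yoyo if x % 2 == 0]
--     highest = max(odds) if odds else None
--     lowest = min(evens) if evens else None
--     return [highest, lowest]
-- ===== Notes on version B (the rewrite author's own statement) =====
-- stated objective: simpler
-- what changed: Replaces the two manual running-accumulator loops with parity-filtered lists reduced by max/min (None when the bucket is empty).
import Mathlib
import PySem

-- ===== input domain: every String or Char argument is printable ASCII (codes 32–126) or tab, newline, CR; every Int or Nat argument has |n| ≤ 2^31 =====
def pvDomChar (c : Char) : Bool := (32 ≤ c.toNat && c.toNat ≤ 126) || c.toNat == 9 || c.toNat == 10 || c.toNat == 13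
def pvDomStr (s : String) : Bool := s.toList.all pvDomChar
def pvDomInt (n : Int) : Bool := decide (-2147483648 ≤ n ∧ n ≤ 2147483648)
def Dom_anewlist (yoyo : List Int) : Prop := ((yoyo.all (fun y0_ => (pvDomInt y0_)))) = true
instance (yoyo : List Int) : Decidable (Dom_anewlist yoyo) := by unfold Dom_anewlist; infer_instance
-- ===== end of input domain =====

-- B replaces A's two running-accumulator loops with parity-filtered lists reduced by max/min; objective: simpler.

-- ===== PORT A =====
-- A's first loop body: running highest odd, starting from None
def anewlistStepH (highest : Option Int) (loop : Int) : Option Int :=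
  match highest with
  | none => if PySem.Int.mod loop 2 = 1 then some loop else none
  | some h => if PySem.Int.mod loop 2 = 1 ∧ loop > h then some loop else some h

-- A's second loop body: running lowest even, starting from None
def anewlistStepL (lowest : Option Int) (loop : Int) : Option Int :=
  match lowest with
  | none => if PySem.Int.mod loop 2 = 0 then some loop else none
  | some l => if PySem.Int.mod loop 2 = 0 ∧ loop < l then some loop else some l

def anewlist (yoyo : List Int) : List (Option Int) :=
  [yoyo.foldl anewlistStepH none, yoyo.foldl anewlistStepL none]

-- ===== PORT B =====
def anewlist_alt (yoyo : List Int) : List (Option Int) :=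
  let odds := yoyo.filter (fun x => PySem.Int.mod x 2 = 1)
  let evens := yoyo.filter (fun x => PySem.Int.mod x 2 = 0)
  [PySem.List.max? odds (fun y => y), PySem.List.min? evens (fun y => y)]

-- ===== PRECONDITION & SPEC =====
def Spec_anewlist (yoyo : List Int) (out : List (Option Int)) : Prop := out = anewlist_alt yoyo
instance (yoyo : List Int) (out : List (Option Int)) : Decidable (Spec_anewlist yoyo out) := by unfold Spec_anewlist; infer_instance

-- ===== CLAIM (what is proved, stated in full; the proofs are below) =====
def Claim_equal_anewlist : Prop := ∀ (yoyo : List Int), Dom_anewlist yoyo → Spec_anewlist yoyo (anewlist yoyo)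

-- ===== LEMMAS AND PROOFS =====

lemma anewlist_mod_two (x : Int) : PySem.Int.mod x 2 = x % 2 :=
  PySem.Int.mod_eq_emod_of_pos (by norm_num)

lemma anewlistHigh_some (xs : List Int) (h : Int) :
    xs.foldl anewlistStepH (some h) =
      some ((xs.filter (fun x => PySem.Int.mod x 2 = 1)).foldl max h) := by
  induction xs generalizing h with
  | nil => rfl
  | cons x t ih =>
    rw [List.foldl_cons, List.filter_cons]
    by_cases hx : PySem.Int.mod x 2 = 1
    · have hx' : x % 2 = 1 := by rw [← anewlist_mod_two]; exact hx
      have hstep : anewlistStepH (some h) x = some (max h x) := by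
        by_cases hgt : x > h
        · simp only [anewlistStepH, hx, hgt, and_true, if_pos]
          rw [max_eq_right (le_of_lt hgt)]
        · have : ¬ (PySem.Int.mod x 2 = 1 ∧ x > h) := by tauto
          simp only [anewlistStepH, this, if_neg, not_false_iff]
          rw [max_eq_left (le_of_not_gt hgt)]
      rw [hstep, ih (max h x)]
      simp [hx']
    · have hx' : ¬ x % 2 = 1 := by rw [← anewlist_mod_two]; exact hx
      have : anewlistStepH (some h) x = some h := by
        have : ¬ (PySem.Int.mod x 2 = 1 ∧ x > h) := by tauto
        simp only [anewlistStepH, this, if_neg, not_false_iff]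
      rw [this, ih h]
      simp [hx']

lemma anewlistLow_some (xs : List Int) (l : Int) :
    xs.foldl anewlistStepL (some l) =
      some ((xs.filter (fun x => PySem.Int.mod x 2 = 0)).foldl min l) := by
  induction xs generalizing l with
  | nil => rfl
  | cons x t ih =>
    rw [List.foldl_cons, List.filter_cons]
    by_cases hx : PySem.Int.mod x 2 = 0
    · have hx' : (2 : Int) ∣ x := by
        rw [anewlist_mod_two] at hx; exact Int.dvd_of_emod_eq_zero hx
      have hstep : anewlistStepL (some l) x = some (min l x) := by
        by_cases hlt : x < l
        · simp only [anewlistStepL, hx, hlt, and_true, if_pos]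
          rw [min_eq_right (le_of_lt hlt)]
        · have : ¬ (PySem.Int.mod x 2 = 0 ∧ x < l) := by tauto
          simp only [anewlistStepL, this, if_neg, not_false_iff]
          rw [min_eq_left (le_of_not_gt hlt)]
      rw [hstep, ih (min l x)]
      simp [hx']
    · have hx' : ¬ (2 : Int) ∣ x := by
        rw [anewlist_mod_two] at hx; omega
      have : anewlistStepL (some l) x = some l := by
        have : ¬ (PySem.Int.mod x 2 = 0 ∧ x < l) := by tauto
        simp only [anewlistStepL, this, if_neg, not_false_iff]
      rw [this, ih l]
      simp [hx']

lemma anewlistHigh_none (xs : List Int) :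
    xs.foldl anewlistStepH none =
      PySem.List.max? (xs.filter (fun x => PySem.Int.mod x 2 = 1)) (fun y => y) := by
  induction xs with
  | nil => rfl
  | cons x t ih =>
    rw [List.foldl_cons, List.filter_cons]
    by_cases hx : PySem.Int.mod x 2 = 1
    · have hx' : x % 2 = 1 := by rw [← anewlist_mod_two]; exact hx
      have : anewlistStepH none x = some x := by simp [anewlistStepH, hx']
      rw [this, anewlistHigh_some t x]
      rw [if_pos (by simp [hx'])]
      rw [PySem.List.max?_id_cons]
    · have hx' : ¬ x % 2 = 1 := by rw [← anewlist_mod_two]; exact hx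
      have hxd : (2 : Int) ∣ x := by omega
      have : anewlistStepH none x = none := by simp [anewlistStepH, hx']
      rw [this, ih]
      simp [hx']

lemma anewlistLow_none (xs : List Int) :
    xs.foldl anewlistStepL none =
      PySem.List.min? (xs.filter (fun x => PySem.Int.mod x 2 = 0)) (fun y => y) := by
  induction xs with
  | nil => rfl
  | cons x t ih =>
    rw [List.foldl_cons, List.filter_cons]
    by_cases hx : PySem.Int.mod x 2 = 0
    · have hx' : (2 : Int) ∣ x := by
        rw [anewlist_mod_two] at hx; exact Int.dvd_of_emod_eq_zero hx
      have hm : x % 2 = 0 := by omega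
      have : anewlistStepL none x = some x := by simp [anewlistStepL, hm]
      rw [this, anewlistLow_some t x]
      rw [if_pos (by simp [hx'])]
      rw [PySem.List.min?_id_cons]
    · have hx' : ¬ (2 : Int) ∣ x := by
        rw [anewlist_mod_two] at hx; omega
      have hm : x % 2 = 1 := by omega
      have : anewlistStepL none x = none := by simp [anewlistStepL, hm]
      rw [this, ih]
      simp [hm]

-- ===== VERDICT (by name: the statement is the Claim_ definition above) =====
theorem anewlist_spec : Claim_equal_anewlist := by
  intro yoyo _
  unfold Spec_anewlist anewlist anewlist_alt
  rw [anewlistHigh_none, anewlistLow_none]
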